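-- pv_equiv track=rewrite | github.com/flacode/lazy_loading | fb.py | big_weights
-- ===== SOURCE A (Python) =====
-- def big_weights(items, trips):
-- 	for item in range(len(items)-1, -1, -1):
-- 		if items[item] >= 50:
-- 			trips=trips+1
-- 			items.pop(item)
-- 			if items != []:
-- 				return big_weights(items, trips)
-- 	return trips
-- ===== SOURCE B (Python) =====
-- def big_weights(items, trips):
--     count = 0
--     i = 0
--     while i < len(items):
--         if items[i] >= 50:
--             items.pop(i)
--             count += 1
--         else:
--             i += 1
--     return trips + count
-- ===== Notes on version B (the rewrite author's own statement) =====
-- stated objective: faster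
-- what changed: Replaces the restart-from-scratch recursion (which rescans the list from the top after every single removal) with one forward in-place pass that pops each >=50 element and counts it, returning trips + count.
import Mathlib
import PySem

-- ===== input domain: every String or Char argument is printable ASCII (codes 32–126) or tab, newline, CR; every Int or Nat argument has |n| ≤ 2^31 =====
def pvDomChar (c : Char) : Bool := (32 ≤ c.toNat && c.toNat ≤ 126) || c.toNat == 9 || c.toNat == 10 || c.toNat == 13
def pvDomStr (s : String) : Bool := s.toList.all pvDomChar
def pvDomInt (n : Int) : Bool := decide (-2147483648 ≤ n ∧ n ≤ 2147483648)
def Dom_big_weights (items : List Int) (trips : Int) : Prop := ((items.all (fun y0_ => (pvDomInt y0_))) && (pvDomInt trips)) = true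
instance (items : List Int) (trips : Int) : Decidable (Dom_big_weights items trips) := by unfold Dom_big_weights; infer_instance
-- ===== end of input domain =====

-- B replaces A's restart-from-scratch recursion with a single forward counting pass;
-- both Pythons mutate `items` in place identically (all >=50 elements removed, survivor
-- order kept); the equivalence proved here is about the RETURN value.

-- ===== PORT A =====
-- One sweep of A's `for item in range(len(items)-1, -1, -1)` loop body; idxs is the
-- remaining descending index list. The indices `range` yields are nonnegative, so Nat
-- indices are exact; the out-of-range branch is Python's IndexError, unreachable from
-- big_weights. `items.pop(item)` with 0 ≤ item < len is exactly List.eraseIdx.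
def bwSweep (xs : List Int) (t : Int) : List Nat → (List Int × Int) ⊕ Int
  | [] => .inr t                                      -- loop fell through: return trips
  | i :: rest =>
    if h : i < xs.length then
      if xs[i] ≥ 50 then                              -- if items[item] >= 50
        if xs.eraseIdx i ≠ [] then .inl (xs.eraseIdx i, t + 1)   -- return big_weights(items, trips+1)
        else bwSweep (xs.eraseIdx i) (t + 1) rest     -- popped to empty: keep looping
      else bwSweep xs t rest
    else .inr t                                       -- unreachable (IndexError in Python)

-- A `.inl` result of a sweep always carries a strictly shorter list (one pop happened).
theorem bwSweep_inl_length (xs : List Int) (t : Int) (idxs : List Nat)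
    (its : List Int) (t' : Int) (h : bwSweep xs t idxs = .inl (its, t')) :
    its.length < xs.length := by
  induction idxs generalizing xs t with
  | nil => simp [bwSweep] at h
  | cons i rest ih =>
    rw [bwSweep] at h
    split_ifs at h with hi h50 hne
    · cases h
      rw [List.length_eraseIdx_of_lt hi]; omega
    · have := ih _ _ h
      simp only [ne_eq, not_not] at hne
      rw [hne] at this
      simp at this
    · exact ih _ _ h

-- `range(len(items)-1, -1, -1)` is the descending index list (List.range n).reverse.
def big_weights (items : List Int) (trips : Int) : Int :=
  match h : bwSweep items trips ((List.range items.length).reverse) with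
  | .inr t => t
  | .inl (its, t) => big_weights its t
termination_by items.length
decreasing_by exact bwSweep_inl_length _ _ _ _ _ h

-- ===== PORT B =====
-- B's while loop examines each element exactly once in order (a pop keeps `i` on the
-- next element), carrying `count`; so it is this structural recursion over the list.
def bwCount (xs : List Int) (count : Int) : Int :=
  match xs with
  | [] => count
  | x :: rest => if x ≥ 50 then bwCount rest (count + 1) else bwCount rest count

def big_weights_alt (items : List Int) (trips : Int) : Int :=
  trips + bwCount items 0

-- ===== PRECONDITION & SPEC =====
def Spec_big_weights (items : List Int) (trips : Int) (out : Int) : Prop := out = big_weights_alt items trips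
instance (items : List Int) (trips : Int) (out : Int) : Decidable (Spec_big_weights items trips out) := by unfold Spec_big_weights; infer_instance

-- ===== CLAIM (what is proved, stated in full; the proofs are below) =====
def Claim_equal_big_weights : Prop := ∀ (items : List Int) (trips : Int), Dom_big_weights items trips → Spec_big_weights items trips (big_weights items trips)

-- ===== LEMMAS AND PROOFS =====

theorem bwCount_shift (xs : List Int) (c : Int) : bwCount xs c = c + bwCount xs 0 := by
  induction xs generalizing c with
  | nil => simp [bwCount]
  | cons x rest ih =>
    by_cases h : x ≥ 50
    · rw [bwCount, if_pos h, bwCount, if_pos h, ih (c+1), ih (0+1)]; ring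
    · rw [bwCount, if_neg h, bwCount, if_neg h, ih c]

theorem bwCount_cons (x : Int) (rest : List Int) :
    bwCount (x :: rest) 0 = (if x ≥ 50 then 1 else 0) + bwCount rest 0 := by
  by_cases h : x ≥ 50
  · rw [bwCount, if_pos h, if_pos h, bwCount_shift]; ring
  · rw [bwCount, if_neg h, if_neg h]; ring

theorem bwCount_eraseIdx (xs : List Int) (j : Nat) (hj : j < xs.length)
    (h50 : xs[j] ≥ 50) : bwCount (xs.eraseIdx j) 0 = bwCount xs 0 - 1 := by
  induction xs generalizing j with
  | nil => simp at hj
  | cons x rest ih =>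
    cases j with
    | zero =>
      simp only [List.getElem_cons_zero] at h50
      simp only [List.eraseIdx]
      rw [bwCount_cons, if_pos h50]; ring
    | succ m =>
      simp only [List.length_cons] at hj
      simp only [List.getElem_cons_succ] at h50
      simp only [List.eraseIdx]
      rw [bwCount_cons, bwCount_cons, ih m (by omega) h50]; ring

theorem bwCount_zero (xs : List Int) (h : ∀ i, (hi : i < xs.length) → xs[i] < 50) :
    bwCount xs 0 = 0 := by
  induction xs with
  | nil => simp [bwCount]
  | cons x rest ih =>
    rw [bwCount_cons]
    have hx : x < 50 := h 0 (by simp)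
    rw [if_neg (by omega), ih (fun i hi => h (i+1) (by simpa using Nat.succ_lt_succ hi))]
    ring

-- Sweep characterisation, all-small case: the loop falls through.
theorem bwSweep_all_small (xs : List Int) (t : Int) (k : Nat) (hk : k ≤ xs.length)
    (h : ∀ i, i < k → (hi : i < xs.length) → xs[i] < 50) :
    bwSweep xs t ((List.range k).reverse) = .inr t := by
  induction k with
  | zero => simp [bwSweep]
  | succ m ih =>
    rw [List.range_succ, List.reverse_append]
    simp only [List.reverse_singleton, List.singleton_append]
    rw [bwSweep]
    have hm : m < xs.length := by omega
    have hs : xs[m] < 50 := h m (by omega) hm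
    rw [dif_pos hm, if_neg (by omega)]
    exact ih (by omega) (fun i hi hlt => h i (by omega) hlt)

-- Sweep characterisation, hit case: j is the topmost index < k with xs[j] ≥ 50.
theorem bwSweep_hit (xs : List Int) (t : Int) (k : Nat) (hk : k ≤ xs.length)
    (j : Nat) (hjk : j < k) (hjl : j < xs.length) (hj50 : xs[j] ≥ 50)
    (hmax : ∀ i, j < i → i < k → (hi : i < xs.length) → xs[i] < 50) :
    bwSweep xs t ((List.range k).reverse) =
      if xs.eraseIdx j ≠ [] then .inl (xs.eraseIdx j, t + 1)
      else .inr (t + 1) := by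
  induction k with
  | zero => omega
  | succ m ih =>
    rw [List.range_succ, List.reverse_append]
    simp only [List.reverse_singleton, List.singleton_append]
    rw [bwSweep]
    have hm : m < xs.length := by omega
    rw [dif_pos hm]
    by_cases hjm : j = m
    · subst hjm
      rw [if_pos hj50]
      by_cases hne : xs.eraseIdx j ≠ []
      · simp [hne]
      · simp only [ne_eq, not_not] at hne
        -- list emptied: length was 1, so j = 0 and the remaining index list is empty
        have hl : (xs.eraseIdx j).length = 0 := by simp [hne]
        rw [List.length_eraseIdx_of_lt hm] at hl
        have hj0 : j = 0 := by omega
        subst hj0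
        rw [if_neg (by simp [hne]), hne]
        simp [bwSweep]
    · have hjm' : j < m := by omega
      have hs : xs[m] < 50 := hmax m (by omega) (by omega) hm
      rw [if_neg (by omega)]
      exact ih (by omega) hjm' (fun i hji him hlt => hmax i hji (by omega) hlt)

-- A returns trips + (number of elements ≥ 50): strong induction on the list length.
theorem big_weights_eq_count (n : Nat) : ∀ (xs : List Int), xs.length = n →
    ∀ t : Int, big_weights xs t = t + bwCount xs 0 := by
  induction n using Nat.strong_induction_on with
  | _ n ih =>
    intro xs hn t
    by_cases hall : ∀ i, (hi : i < xs.length) → xs[i] < 50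
    · rw [big_weights,
        bwSweep_all_small xs t xs.length le_rfl (fun i _ hi => hall i hi),
        bwCount_zero xs hall]
      ring
    · push_neg at hall
      obtain ⟨i0, hi0, h50⟩ := hall
      -- j := the greatest index whose element is ≥ 50 (the first hit of A's scan)
      set j := Nat.findGreatest (fun i => 50 ≤ xs.getD i 0) xs.length with hjdef
      have hPi0 : 50 ≤ xs.getD i0 0 := by
        rw [List.getD_eq_getElem?_getD, List.getElem?_eq_getElem hi0]; simpa using h50
      have hPj : 50 ≤ xs.getD j 0 :=
        Nat.findGreatest_spec (P := fun i => 50 ≤ xs.getD i 0) (n := xs.length) (m := i0) (by omega) hPi0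
      have hjle : j ≤ xs.length := Nat.findGreatest_le xs.length
      have hjl : j < xs.length := by
        rcases Nat.lt_or_ge j xs.length with h | h
        · exact h
        · exfalso
          have hj : j = xs.length := by omega
          rw [hj, List.getD_eq_getElem?_getD, List.getElem?_eq_none (by omega)] at hPj
          simp at hPj
      have hj50 : xs[j] ≥ 50 := by
        rwa [List.getD_eq_getElem?_getD, List.getElem?_eq_getElem hjl] at hPj
      have hmax : ∀ i, j < i → i < xs.length → (hi : i < xs.length) → xs[i] < 50 := by
        intro i hji hilt hi
        by_contra hc
        have : ¬ (50 ≤ xs.getD i 0) :=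
          Nat.findGreatest_is_greatest (P := fun i => 50 ≤ xs.getD i 0) hji (by omega)
        rw [List.getD_eq_getElem?_getD, List.getElem?_eq_getElem hi] at this
        simp at this
        omega
      rw [big_weights]
      rw [bwSweep_hit xs t xs.length le_rfl j hjl hjl hj50 (fun i hji him hi => hmax i hji him hi)]
      by_cases hne : xs.eraseIdx j ≠ []
      · rw [if_pos hne]
        have hlen : (xs.eraseIdx j).length = n - 1 := by
          rw [List.length_eraseIdx_of_lt hjl]; omega
        show big_weights (xs.eraseIdx j) (t + 1) = t + bwCount xs 0
        rw [ih (n-1) (by omega) (xs.eraseIdx j) hlen (t+1),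
          bwCount_eraseIdx xs j hjl hj50]
        ring
      · rw [if_neg hne]
        simp only [ne_eq, not_not] at hne
        have hcnt : bwCount xs 0 = 1 := by
          have h1 := bwCount_eraseIdx xs j hjl hj50
          rw [hne] at h1
          simp [bwCount] at h1
          omega
        show t + 1 = t + bwCount xs 0
        rw [hcnt]

-- ===== VERDICT (by name: the statement is the Claim_ definition above) =====
theorem big_weights_spec : Claim_equal_big_weights := by
  intro items trips _
  unfold Spec_big_weights big_weights_alt
  exact big_weights_eq_count items.length items rfl trips
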